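-- pv_equiv track=rewrite | github.com/delphes/delphes | python/TtbarEventSelection.py | isInCategory
-- ===== SOURCE A (Python) =====
-- def isInCategory(category, categoryData):
--   """Check if the event enters category X, given the tuple computed by eventCategory."""
--   if category==0:
--     return (categoryData[0]>0 or categoryData[1]>0) and categoryData[2]>=4
--   elif category==1:
--     return isInCategory(0,categoryData) and (categoryData[3]>15 or categoryData[4]>15) and categoryData[5]>=4
--   elif category==2:
--     return isInCategory(1,categoryData) and categoryData[6]>=2
--   elif category==3:
--     return isInCategory(2,categoryData) and categoryData[7]>0
--   elif category==4:
--     return isInCategory(2,categoryData) and categoryData[8]>0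
--   elif category==5:
--     return isInCategory(2,categoryData) and categoryData[9]>0
--   else:
--     return False
-- ===== SOURCE B (Python) =====
-- def isInCategory(category, categoryData):
--   """Check if the event enters category X, given the tuple computed by eventCategory."""
--   if category not in (0, 1, 2, 3, 4, 5):
--     return False
--   if not ((categoryData[0] > 0 or categoryData[1] > 0) and categoryData[2] >= 4):
--     return False
--   if category == 0:
--     return True
--   if not ((categoryData[3] > 15 or categoryData[4] > 15) and categoryData[5] >= 4):
--     return False
--   if category == 1:
--     return True
--   if categoryData[6] < 2:
--     return False
--   if category == 2:
--     return True
--   if category == 3: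
--     return categoryData[7] > 0
--   if category == 4:
--     return categoryData[8] > 0
--   return categoryData[9] > 0
-- ===== Notes on version B (the rewrite author's own statement) =====
-- stated objective: simpler
-- what changed: Replaces A's recursive cascade (each category re-invoking the check for the previous category) with a single flat early-returning guard chain that tests each cut once in the same short-circuit order.
import Mathlib
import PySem

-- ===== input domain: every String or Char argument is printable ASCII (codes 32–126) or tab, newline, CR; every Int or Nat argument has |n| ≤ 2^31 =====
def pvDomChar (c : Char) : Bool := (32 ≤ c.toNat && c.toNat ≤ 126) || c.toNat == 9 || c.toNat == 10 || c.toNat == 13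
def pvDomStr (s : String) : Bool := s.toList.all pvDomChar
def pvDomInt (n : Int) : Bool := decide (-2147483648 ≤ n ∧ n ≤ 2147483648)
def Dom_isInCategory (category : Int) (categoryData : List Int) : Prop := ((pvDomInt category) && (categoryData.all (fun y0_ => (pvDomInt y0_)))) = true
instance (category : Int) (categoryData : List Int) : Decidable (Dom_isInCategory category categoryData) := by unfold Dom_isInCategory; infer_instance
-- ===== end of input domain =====

-- B replaces A's recursive cascade by a flat early-returning guard chain (objective: simpler).
-- Python's categoryData[i] raises IndexError out of range; Pre_ excludes exactly those inputs,
-- so both ports read list entries with default 0 (never observed inside Pre_).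

-- ===== PORT A =====
def isInCategory (category : Int) (categoryData : List Int) : Bool :=
  if category == 0 then
    (categoryData.getD 0 0 > 0 || categoryData.getD 1 0 > 0) && categoryData.getD 2 0 ≥ 4
  else if category == 1 then
    isInCategory 0 categoryData &&
      ((categoryData.getD 3 0 > 15 || categoryData.getD 4 0 > 15) && categoryData.getD 5 0 ≥ 4)
  else if category == 2 then
    isInCategory 1 categoryData && categoryData.getD 6 0 ≥ 2
  else if category == 3 then
    isInCategory 2 categoryData && categoryData.getD 7 0 > 0
  else if category == 4 then
    isInCategory 2 categoryData && categoryData.getD 8 0 > 0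
  else if category == 5 then
    isInCategory 2 categoryData && categoryData.getD 9 0 > 0
  else false
termination_by category.natAbs
decreasing_by all_goals (simp_all [beq_iff_eq]; try omega)

-- ===== PORT B =====
def isInCategory_alt (category : Int) (categoryData : List Int) : Bool :=
  if !(category == 0 || category == 1 || category == 2 || category == 3 || category == 4 || category == 5) then
    false
  else if !((categoryData.getD 0 0 > 0 || categoryData.getD 1 0 > 0) && categoryData.getD 2 0 ≥ 4) then
    false
  else if category == 0 then
    true
  else if !((categoryData.getD 3 0 > 15 || categoryData.getD 4 0 > 15) && categoryData.getD 5 0 ≥ 4) then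
    false
  else if category == 1 then
    true
  else if categoryData.getD 6 0 < 2 then
    false
  else if category == 2 then
    true
  else if category == 3 then
    categoryData.getD 7 0 > 0
  else if category == 4 then
    categoryData.getD 8 0 > 0
  else
    categoryData.getD 9 0 > 0

-- ===== PRECONDITION & SPEC =====
-- Pre_ is exactly the inputs on which Python A returns (A raises IndexError elsewhere),
-- tracking A's short-circuit order of index accesses; preR<k>/preV<k> = "A's category-k
-- check returns without raising" / "A's category-k check is True". (x ==> y) abbreviates !x || y.
abbrev pimp (x y : Bool) : Bool := !x || y
abbrev preV0 (d : List Int) : Bool := (decide (0 < d.getD 0 0) || decide (0 < d.getD 1 0)) && decide (4 ≤ d.getD 2 0)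
abbrev preV1 (d : List Int) : Bool := preV0 d && (decide (15 < d.getD 3 0) || decide (15 < d.getD 4 0)) && decide (4 ≤ d.getD 5 0)
abbrev preV2 (d : List Int) : Bool := preV1 d && decide (2 ≤ d.getD 6 0)
abbrev preR0 (d : List Int) : Bool :=
  decide (1 ≤ d.length) && pimp (decide (0 < d.getD 0 0)) (decide (3 ≤ d.length)) &&
    pimp (decide (d.getD 0 0 ≤ 0)) (decide (2 ≤ d.length) && pimp (decide (0 < d.getD 1 0)) (decide (3 ≤ d.length)))
abbrev preR1 (d : List Int) : Bool :=
  preR0 d && pimp (preV0 d) (decide (4 ≤ d.length) && pimp (decide (15 < d.getD 3 0)) (decide (6 ≤ d.length)) &&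
    pimp (decide (d.getD 3 0 ≤ 15)) (decide (5 ≤ d.length) && pimp (decide (15 < d.getD 4 0)) (decide (6 ≤ d.length))))
abbrev preR2 (d : List Int) : Bool := preR1 d && pimp (preV1 d) (decide (7 ≤ d.length))
def Pre_isInCategory (category : Int) (categoryData : List Int) : Prop :=
  (pimp (decide (category = 0)) (preR0 categoryData) &&
   pimp (decide (category = 1)) (preR1 categoryData) &&
   pimp (decide (category = 2)) (preR2 categoryData) &&
   pimp (decide (category = 3)) (preR2 categoryData && pimp (preV2 categoryData) (decide (8 ≤ categoryData.length))) &&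
   pimp (decide (category = 4)) (preR2 categoryData && pimp (preV2 categoryData) (decide (9 ≤ categoryData.length))) &&
   pimp (decide (category = 5)) (preR2 categoryData && pimp (preV2 categoryData) (decide (10 ≤ categoryData.length)))) = true
instance (category : Int) (categoryData : List Int) : Decidable (Pre_isInCategory category categoryData) := by unfold Pre_isInCategory; infer_instance

def pvWitness_isInCategory : Int × List Int := (2, [1, 0, 5, 20, 0, 4, 2])

def Spec_isInCategory (category : Int) (categoryData : List Int) (out : Bool) : Prop := out = isInCategory_alt category categoryData
instance (category : Int) (categoryData : List Int) (out : Bool) : Decidable (Spec_isInCategory category categoryData out) := by unfold Spec_isInCategory; infer_instance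

-- ===== CLAIM (what is proved, stated in full; the proofs are below) =====
def Claim_equal_isInCategory : Prop := ∀ (category : Int) (categoryData : List Int), Dom_isInCategory category categoryData → Pre_isInCategory category categoryData → Spec_isInCategory category categoryData (isInCategory category categoryData)

-- ===== LEMMAS AND PROOFS =====
theorem isA0 (d : List Int) :
    isInCategory 0 d = ((d.getD 0 0 > 0 || d.getD 1 0 > 0) && d.getD 2 0 ≥ 4) := by
  rw [isInCategory]; norm_num

theorem isA1 (d : List Int) :
    isInCategory 1 d = (isInCategory 0 d &&
      ((d.getD 3 0 > 15 || d.getD 4 0 > 15) && d.getD 5 0 ≥ 4)) := by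
  rw [isInCategory]; norm_num

theorem isA2 (d : List Int) :
    isInCategory 2 d = (isInCategory 1 d && d.getD 6 0 ≥ 2) := by
  rw [isInCategory]; norm_num

theorem eq_alt_0 (d : List Int) : isInCategory 0 d = isInCategory_alt 0 d := by
  rw [isA0]
  simp only [isInCategory_alt]
  generalize ((decide (d.getD 0 0 > 0) || decide (d.getD 1 0 > 0)) && decide (d.getD 2 0 ≥ 4)) = b0
  cases b0 <;> simp

theorem eq_alt_1 (d : List Int) : isInCategory 1 d = isInCategory_alt 1 d := by
  rw [isA1, isA0]
  simp only [isInCategory_alt]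
  generalize ((decide (d.getD 0 0 > 0) || decide (d.getD 1 0 > 0)) && decide (d.getD 2 0 ≥ 4)) = b0
  generalize ((decide (d.getD 3 0 > 15) || decide (d.getD 4 0 > 15)) && decide (d.getD 5 0 ≥ 4)) = b1
  cases b0 <;> cases b1 <;> simp

theorem eq_alt_2 (d : List Int) : isInCategory 2 d = isInCategory_alt 2 d := by
  rw [isA2, isA1, isA0]
  simp only [isInCategory_alt]
  generalize ((decide (d.getD 0 0 > 0) || decide (d.getD 1 0 > 0)) && decide (d.getD 2 0 ≥ 4)) = b0
  generalize ((decide (d.getD 3 0 > 15) || decide (d.getD 4 0 > 15)) && decide (d.getD 5 0 ≥ 4)) = b1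
  by_cases h6 : d.getD 6 0 < 2
  · rw [if_pos h6, decide_eq_false (by omega : ¬ (d.getD 6 0 ≥ 2))]
    cases b0 <;> cases b1 <;> simp
  · rw [if_neg h6, decide_eq_true (by omega : d.getD 6 0 ≥ 2)]
    cases b0 <;> cases b1 <;> simp

theorem eq_alt_3 (d : List Int) : isInCategory 3 d = isInCategory_alt 3 d := by
  rw [isInCategory, isA2, isA1, isA0]
  simp only [isInCategory_alt]
  generalize ((decide (d.getD 0 0 > 0) || decide (d.getD 1 0 > 0)) && decide (d.getD 2 0 ≥ 4)) = b0
  generalize ((decide (d.getD 3 0 > 15) || decide (d.getD 4 0 > 15)) && decide (d.getD 5 0 ≥ 4)) = b1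
  by_cases h6 : d.getD 6 0 < 2
  · rw [if_pos h6, decide_eq_false (by omega : ¬ (d.getD 6 0 ≥ 2))]
    cases b0 <;> cases b1 <;> simp
  · rw [if_neg h6, decide_eq_true (by omega : d.getD 6 0 ≥ 2)]
    cases b0 <;> cases b1 <;> simp

theorem eq_alt_4 (d : List Int) : isInCategory 4 d = isInCategory_alt 4 d := by
  rw [isInCategory, isA2, isA1, isA0]
  simp only [isInCategory_alt]
  generalize ((decide (d.getD 0 0 > 0) || decide (d.getD 1 0 > 0)) && decide (d.getD 2 0 ≥ 4)) = b0
  generalize ((decide (d.getD 3 0 > 15) || decide (d.getD 4 0 > 15)) && decide (d.getD 5 0 ≥ 4)) = b1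
  by_cases h6 : d.getD 6 0 < 2
  · rw [if_pos h6, decide_eq_false (by omega : ¬ (d.getD 6 0 ≥ 2))]
    cases b0 <;> cases b1 <;> simp
  · rw [if_neg h6, decide_eq_true (by omega : d.getD 6 0 ≥ 2)]
    cases b0 <;> cases b1 <;> simp

theorem eq_alt_5 (d : List Int) : isInCategory 5 d = isInCategory_alt 5 d := by
  rw [isInCategory, isA2, isA1, isA0]
  simp only [isInCategory_alt]
  generalize ((decide (d.getD 0 0 > 0) || decide (d.getD 1 0 > 0)) && decide (d.getD 2 0 ≥ 4)) = b0
  generalize ((decide (d.getD 3 0 > 15) || decide (d.getD 4 0 > 15)) && decide (d.getD 5 0 ≥ 4)) = b1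
  by_cases h6 : d.getD 6 0 < 2
  · rw [if_pos h6, decide_eq_false (by omega : ¬ (d.getD 6 0 ≥ 2))]
    cases b0 <;> cases b1 <;> simp
  · rw [if_neg h6, decide_eq_true (by omega : d.getD 6 0 ≥ 2)]
    cases b0 <;> cases b1 <;> simp

theorem isInCategory_eq_alt (category : Int) (categoryData : List Int) :
    isInCategory category categoryData = isInCategory_alt category categoryData := by
  by_cases h0 : category = 0
  · subst h0; exact eq_alt_0 categoryData
  by_cases h1 : category = 1
  · subst h1; exact eq_alt_1 categoryData
  by_cases h2 : category = 2
  · subst h2; exact eq_alt_2 categoryData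
  by_cases h3 : category = 3
  · subst h3; exact eq_alt_3 categoryData
  by_cases h4 : category = 4
  · subst h4; exact eq_alt_4 categoryData
  by_cases h5 : category = 5
  · subst h5; exact eq_alt_5 categoryData
  have e0 : (category == 0) = false := by simp [h0]
  have e1 : (category == 1) = false := by simp [h1]
  have e2 : (category == 2) = false := by simp [h2]
  have e3 : (category == 3) = false := by simp [h3]
  have e4 : (category == 4) = false := by simp [h4]
  have e5 : (category == 5) = false := by simp [h5]
  rw [isInCategory]
  simp only [isInCategory_alt, e0, e1, e2, e3, e4, e5]
  simp

-- ===== VERDICT (by name: the statement is the Claim_ definition above) =====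
theorem isInCategory_spec : Claim_equal_isInCategory := by
  intro category categoryData _ _
  exact isInCategory_eq_alt category categoryData
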